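-- pv_equiv track=rewrite | github.com/yufeicheniffy/msccs-t23 | app/routes.py | beautify_html
-- ===== SOURCE A (Python) =====
-- def beautify_html(tweets):
--     data_page = 1
--     html = '<div class="pagination-container"><div data-page="1"><div class="row">'
--
--     for i in range(0, len(tweets)):
--         if i == len(tweets) - 1:
--             html += '</div></div>'
--             break
--
--         if i % 20 == 0  and i != 0:
--             data_page += 1
--             html += '</div></div><div data-page="' + str(data_page) + '" style="display:none;"><div class="row">'
--
--         if i % 2 == 0 and i != 0 and i % 20 != 0:
--             html += '</div><div class="row">'
--
--         html += '<div class="col-sm">' + tweets[i]['html'] + '</div>'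
--
--     html += """<div class="text-center">
--                 <div class="pagination pagination-centered">
--                   <ul class="pagination ">
--                     <li data-page="-" ><a href="#" class="page-link">&lt;</a></li>
--                     <li data-page="1"><a href="#" class="page-link">1</a></li>"""
--
--     for i in range(2, data_page + 1):
--         html += '<li data-page="' + str(i) + '"><a href="#" class="page-link">' + str(i) + '</a></li>'
--
--     html += """     <li data-page="+"><a href="#" class="page-link">&gt;</a></li>
--                    </ul>
--                   </div>
--                  </div>
--                 </div>"""
--
--     return html
-- ===== SOURCE B (Python) =====
-- FOOTER_HEAD = """<div class="text-center">
--                 <div class="pagination pagination-centered">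
--                   <ul class="pagination ">
--                     <li data-page="-" ><a href="#" class="page-link">&lt;</a></li>
--                     <li data-page="1"><a href="#" class="page-link">1</a></li>"""
--
-- FOOTER_TAIL = """     <li data-page="+"><a href="#" class="page-link">&gt;</a></li>
--                    </ul>
--                   </div>
--                  </div>
--                 </div>"""
--
--
-- def beautify_html(tweets):
--     # render everything except the last tweet (the original drops it), in
--     # explicit page chunks of 20 and row chunks of 2
--     rendered = [t['html'] for t in tweets[:-1]]
--     html = '<div class="pagination-container"><div data-page="1"><div class="row">'
--     pages = 0
--     rest = rendered
--     while rest: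
--         pages += 1
--         page, rest = rest[:20], rest[20:]
--         if pages > 1:
--             html += ('</div></div><div data-page="' + str(pages)
--                      + '" style="display:none;"><div class="row">')
--         first = True
--         while page:
--             row, page = page[:2], page[2:]
--             if not first:
--                 html += '</div><div class="row">'
--             first = False
--             for h in row:
--                 html += '<div class="col-sm">' + h + '</div>'
--     if tweets:
--         html += '</div></div>'
--     num_pages = pages if pages else 1
--     html += FOOTER_HEAD
--     for k in range(2, num_pages + 1):
--         html += '<li data-page="' + str(k) + '"><a href="#" class="page-link">' + str(k) + '</a></li>'
--     html += FOOTER_TAIL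
--     return html
-- ===== Notes on version B (the rewrite author's own statement) =====
-- stated objective: alternative
-- what changed: Replaces A's single index loop with modulus tests and a break by an explicit nested chunking pass: slice off the last tweet up front, emit pages as chunks of 20 and rows as chunks of 2, and derive the page count from the chunk counter.
import Mathlib
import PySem

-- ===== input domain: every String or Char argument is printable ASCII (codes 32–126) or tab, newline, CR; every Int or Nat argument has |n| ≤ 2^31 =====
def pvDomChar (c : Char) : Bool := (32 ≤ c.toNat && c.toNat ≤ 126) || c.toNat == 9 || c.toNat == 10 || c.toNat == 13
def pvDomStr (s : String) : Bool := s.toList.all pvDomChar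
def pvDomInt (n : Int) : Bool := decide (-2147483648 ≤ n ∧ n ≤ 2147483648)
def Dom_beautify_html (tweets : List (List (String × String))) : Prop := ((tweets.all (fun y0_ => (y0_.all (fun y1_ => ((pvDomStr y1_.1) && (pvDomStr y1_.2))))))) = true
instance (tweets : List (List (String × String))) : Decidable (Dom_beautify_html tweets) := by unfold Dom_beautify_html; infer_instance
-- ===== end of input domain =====

-- B renders the same paginated HTML by explicit page chunks of 20 and row chunks of 2
-- instead of A's single index loop with modulus tests (objective: alternative decomposition,
-- same cost). Equality of the RETURN value is proved on Pre_ (all non-last tweets carry 'html').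

-- shared string constants and tiny formatters (both Pythons contain these same literals)
def pvHeader : String := "<div class=\"pagination-container\"><div data-page=\"1\"><div class=\"row\">"
def pvClose : String := "</div></div>"
def pvRowBrk : String := "</div><div class=\"row\">"
def pvPageHdr (k : Int) : String :=
  "</div></div><div data-page=\"" ++ PySem.Int.toStr k ++ "\" style=\"display:none;\"><div class=\"row\">"
def pvItem (h : String) : String := "<div class=\"col-sm\">" ++ h ++ "</div>"
def pvLi (i : Int) : String :=
  "<li data-page=\"" ++ PySem.Int.toStr i ++ "\"><a href=\"#\" class=\"page-link\">" ++ PySem.Int.toStr i ++ "</a></li>"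
def pvFooterHead : String := "<div class=\"text-center\">\n                <div class=\"pagination pagination-centered\">\n                  <ul class=\"pagination \">\n                    <li data-page=\"-\" ><a href=\"#\" class=\"page-link\">&lt;</a></li>\n                    <li data-page=\"1\"><a href=\"#\" class=\"page-link\">1</a></li>"
def pvFooterTail : String := "     <li data-page=\"+\"><a href=\"#\" class=\"page-link\">&gt;</a></li>\n                   </ul>\n                  </div>\n                 </div>\n                </div>"
-- t['html'], total with default "" (exact under Pre_: the key is present)
def pvGetHtml (t : List (String × String)) : String :=
  ((PySem.Dict.ofList t).get? "html").getD ""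
-- the pagination tail loop 'for i in range(2, data_page + 1)' (identical in both Pythons)
def pvFooterLoop (np : Int) (html : String) : String :=
  (PySem.List.pyRange 2 (np + 1) 1).foldl (fun acc i => acc ++ pvLi i) html

-- ===== PORT A =====
-- A's single loop over range(0, len(tweets)) with the break at i == len-1;
-- state (data_page, html)
def pvLoopA (tweets : List (List (String × String))) (n : Int) :
    List Int → Int × String → Int × String
  | [], st => st
  | i :: rest, (dp, html) =>
    if i = n - 1 then (dp, html ++ pvClose)
    else
      let (dp, html) :=
        if PySem.Int.mod i 20 = 0 ∧ i ≠ 0 then (dp + 1, html ++ pvPageHdr (dp + 1))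
        else (dp, html)
      let html :=
        if PySem.Int.mod i 2 = 0 ∧ i ≠ 0 ∧ PySem.Int.mod i 20 ≠ 0 then html ++ pvRowBrk
        else html
      let html := html ++ pvItem (pvGetHtml ((PySem.List.pyGet? tweets i).getD []))
      pvLoopA tweets n rest (dp, html)

def beautify_html (tweets : List (List (String × String))) : String :=
  let n : Int := tweets.length
  let st := pvLoopA tweets n (PySem.List.pyRange 0 n 1) (1, pvHeader)
  pvFooterLoop st.1 (st.2 ++ pvFooterHead) ++ pvFooterTail

-- ===== PORT B =====
-- B's inner loop: rows of 2 within one page ('while page:')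
def pvRowLoop : List String → Bool → String → String
  | [], _, html => html
  | h :: t, first, html =>
    let page := h :: t
    let row := page.take 2
    let rest := page.drop 2
    let html := if first then html else html ++ pvRowBrk
    let html := row.foldl (fun acc x => acc ++ pvItem x) html
    pvRowLoop rest false html
  termination_by page _ _ => page.length
  decreasing_by simp [List.drop]

-- B's outer loop: pages of 20 ('while rest:'), returning (pages, html)
def pvPageLoop : List String → Int → String → Int × String
  | [], pages, html => (pages, html)
  | x :: xs, pages, html =>
    let rest := x :: xs
    let pages := pages + 1
    let page := rest.take 20
    let rest2 := rest.drop 20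
    let html := if pages > 1 then html ++ pvPageHdr pages else html
    let html := pvRowLoop page true html
    pvPageLoop rest2 pages html
  termination_by rest _ _ => rest.length
  decreasing_by simp [List.drop]

def beautify_html_alt (tweets : List (List (String × String))) : String :=
  let rendered := (PySem.List.slice tweets none (some (-1))).map pvGetHtml
  let pr := pvPageLoop rendered 0 pvHeader
  let html := if tweets.isEmpty then pr.2 else pr.2 ++ pvClose
  let np := if pr.1 ≠ 0 then pr.1 else 1
  pvFooterLoop np (html ++ pvFooterHead) ++ pvFooterTail

-- ===== PRECONDITION & SPEC =====
-- Pre_ excludes exactly the inputs where A raises KeyError: a tweet other than the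
-- last without an 'html' key.
def Pre_beautify_html (tweets : List (List (String × String))) : Prop :=
  ∀ t ∈ tweets.dropLast, ((PySem.Dict.ofList t).get? "html").isSome = true
instance (tweets : List (List (String × String))) : Decidable (Pre_beautify_html tweets) := by
  unfold Pre_beautify_html; infer_instance
def pvWitness_beautify_html : (List (List (String × String))) :=
  [[("html", "a")], [("html", "b")]]

def Spec_beautify_html (tweets : List (List (String × String))) (out : String) : Prop := out = beautify_html_alt tweets
instance (tweets : List (List (String × String))) (out : String) : Decidable (Spec_beautify_html tweets out) := by unfold Spec_beautify_html; infer_instance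

-- ===== CLAIM (what is proved, stated in full; the proofs are below) =====
def Claim_equal_beautify_html : Prop := ∀ (tweets : List (List (String × String))), Dom_beautify_html tweets → Pre_beautify_html tweets → Spec_beautify_html tweets (beautify_html tweets)

-- ===== LEMMAS AND PROOFS =====

-- proof-only middle form: A's per-index body over the rendered strings, Nat index
def pvBody : List String → Nat → Int × String → Int × String
  | [], _, st => st
  | h :: t, i, (dp, html) =>
    let (dp, html) :=
      if i % 20 = 0 ∧ i ≠ 0 then (dp + 1, html ++ pvPageHdr (dp + 1)) else (dp, html)
    let html := if i % 2 = 0 ∧ i ≠ 0 ∧ i % 20 ≠ 0 then html ++ pvRowBrk else html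
    pvBody t (i + 1) (dp, html ++ pvItem h)

lemma pvBody_append (ys zs : List String) (i : Nat) (st : Int × String) :
    pvBody (ys ++ zs) i st = pvBody zs (i + ys.length) (pvBody ys i st) := by
  induction ys generalizing i st with
  | nil => simp [pvBody]
  | cons h t ih =>
    obtain ⟨dp, html⟩ := st
    simp only [List.cons_append, pvBody, List.length_cons]
    rw [ih]
    congr 1
    omega

lemma pvBridgeAux (tweets : List (List (String × String))) (k : Nat) :
    ∀ (j : Nat), tweets.length - 1 - j = k → 1 ≤ tweets.length → j ≤ tweets.length - 1 →
    ∀ (dp : Int) (html : String),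
    pvLoopA tweets (tweets.length : Int) (PySem.List.pyRange (j : Int) (tweets.length : Int) 1) (dp, html)
      = (fun st => (st.1, st.2 ++ pvClose))
          (pvBody (((tweets.dropLast).map pvGetHtml).drop j) j (dp, html)) := by
  induction k with
  | zero =>
    intro j hk h1 hj dp html
    have hjm : j = tweets.length - 1 := by omega
    have hlt : (j : Int) < (tweets.length : Int) := by push_cast; omega
    rw [PySem.List.pyRange_one_cons hlt]
    have hcond : (j : Int) = (tweets.length : Int) - 1 := by push_cast; omega
    simp only [pvLoopA, hcond, if_true, ite_true, reduceIte]
    rw [List.drop_eq_nil_of_le (by simp; omega)]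
    simp [pvBody]
  | succ k ih =>
    intro j hk h1 hj dp html
    have hjlt : j < tweets.length - 1 := by omega
    have hlt : (j : Int) < (tweets.length : Int) := by push_cast; omega
    rw [PySem.List.pyRange_one_cons hlt]
    have hcond : ¬ ((j : Int) = (tweets.length : Int) - 1) := by push_cast; omega
    have hjlen : j < ((tweets.dropLast).map pvGetHtml).length := by simp; omega
    have hdrop : (((tweets.dropLast).map pvGetHtml).drop j)
        = ((tweets.dropLast).map pvGetHtml)[j] :: (((tweets.dropLast).map pvGetHtml).drop (j+1)) :=
      List.drop_eq_getElem_cons hjlen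
    have hget : ((tweets.dropLast).map pvGetHtml)[j]
        = pvGetHtml (tweets[j]'(by omega)) := by
      simp [List.getElem_dropLast]
    have hgetA : (PySem.List.pyGet? tweets (j : Int)).getD []
        = tweets[j]'(by omega) := by
      simp [PySem.List.pyGet?_natCast, List.getElem?_eq_getElem (by omega : j < tweets.length)]
    have hrec := ih (j+1) (by omega) h1 (by omega)
    have e1 : (PySem.Int.mod (j:Int) 20 = 0 ∧ (j:Int) ≠ 0) ↔ (j % 20 = 0 ∧ j ≠ 0) := by
      rw [PySem.Int.mod_eq_emod_of_pos (by norm_num : (0:Int) < 20)]; omega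
    have e2 : (PySem.Int.mod (j:Int) 2 = 0 ∧ (j:Int) ≠ 0 ∧ PySem.Int.mod (j:Int) 20 ≠ 0)
        ↔ (j % 2 = 0 ∧ j ≠ 0 ∧ j % 20 ≠ 0) := by
      rw [PySem.Int.mod_eq_emod_of_pos (by norm_num : (0:Int) < 2),
          PySem.Int.mod_eq_emod_of_pos (by norm_num : (0:Int) < 20)]; omega
    rw [hdrop]
    by_cases hc1 : j % 20 = 0 ∧ j ≠ 0 <;> by_cases hc2 : j % 2 = 0 ∧ j ≠ 0 ∧ j % 20 ≠ 0 <;>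
      (simp only [pvLoopA, pvBody, hcond, hget, hgetA, e1, e2, hc1, hc2, if_true, if_false,
        ite_true, ite_false, not_false_eq_true, reduceIte]
       rw [show ((j:Int) + 1) = ((j+1 : Nat) : Int) by push_cast; ring]
       exact hrec _ _)

lemma pvBridge (tweets : List (List (String × String))) (j : Nat)
    (h1 : 1 ≤ tweets.length) (hj : j ≤ tweets.length - 1) (dp : Int) (html : String) :
    pvLoopA tweets (tweets.length : Int) (PySem.List.pyRange (j : Int) (tweets.length : Int) 1) (dp, html)
      = (fun st => (st.1, st.2 ++ pvClose))
          (pvBody (((tweets.dropLast).map pvGetHtml).drop j) j (dp, html)) := by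
  exact pvBridgeAux tweets _ j rfl h1 hj dp html

lemma pvRows (N : Nat) : ∀ (page : List String) (p j : Nat) (dp : Int) (html : String),
    page.length ≤ N → j % 2 = 0 → 0 < j → j + page.length ≤ 20 →
    pvBody page (20 * p + j) (dp, html) = (dp, pvRowLoop page false html) := by
  induction N with
  | zero =>
    intro page p j dp html hN _ _ _
    have : page = [] := List.eq_nil_of_length_eq_zero (by omega)
    subst this; simp [pvBody, pvRowLoop]
  | succ N ih =>
    intro page p j dp html hN h2 hj h20
    match page with
    | [] => simp [pvBody, pvRowLoop]
    | [h] =>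
      have c1 : ¬ ((20 * p + j) % 20 = 0 ∧ 20 * p + j ≠ 0) := by
        simp at h20; omega
      have c2 : (20 * p + j) % 2 = 0 ∧ 20 * p + j ≠ 0 ∧ (20 * p + j) % 20 ≠ 0 := by
        simp at h20; omega
      simp only [pvBody, pvRowLoop, if_neg c1, if_pos c2, List.take_succ_cons, List.take_zero,
        List.drop_succ_cons, List.drop_zero, List.foldl_cons, List.foldl_nil, ite_true,
        ite_false, reduceIte]
      simp [pvRowLoop]
    | h1 :: h2e :: t =>
      have hlen : t.length + 2 ≤ 20 - j := by simp at h20; omega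
      have c1 : ¬ ((20 * p + j) % 20 = 0 ∧ 20 * p + j ≠ 0) := by omega
      have c2 : (20 * p + j) % 2 = 0 ∧ 20 * p + j ≠ 0 ∧ (20 * p + j) % 20 ≠ 0 := by omega
      have c3 : ¬ ((20 * p + j + 1) % 20 = 0 ∧ 20 * p + j + 1 ≠ 0) := by omega
      have c4 : ¬ ((20 * p + j + 1) % 2 = 0 ∧ 20 * p + j + 1 ≠ 0 ∧ (20 * p + j + 1) % 20 ≠ 0) := by
        omega
      simp only [pvBody, pvRowLoop, if_neg c1, if_pos c2, if_neg c3, if_neg c4,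
        List.take_succ_cons, List.take_zero, List.drop_succ_cons, List.drop_zero,
        List.foldl_cons, List.foldl_nil, List.take, List.drop, ite_true, ite_false, reduceIte]
      rw [show 20 * p + j + 1 + 1 = 20 * p + (j + 2) by omega]
      exact ih t p (j + 2) dp _ (by simp at hN; omega) (by omega) (by omega) (by simp at h20 ⊢; omega)

lemma pvPage (page : List String) (p : Nat) (html : String)
    (hne : page ≠ []) (hlen : page.length ≤ 20) :
    pvBody page (20 * p) ((if p = 0 then 1 else (p : Int)), html)
      = ((p : Int) + 1, pvRowLoop page true
          (if 0 < p then html ++ pvPageHdr ((p : Int) + 1) else html)) := by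
  have hdr : (if (20 * p) % 20 = 0 ∧ 20 * p ≠ 0 then
        ((if p = 0 then 1 else (p : Int)) + 1,
          html ++ pvPageHdr ((if p = 0 then 1 else (p : Int)) + 1))
      else ((if p = 0 then 1 else (p : Int)), html))
      = ((p : Int) + 1, if 0 < p then html ++ pvPageHdr ((p : Int) + 1) else html) := by
    by_cases hp : p = 0 <;> simp [hp]
  match page with
  | [h] =>
    have c2 : ¬ ((20 * p) % 2 = 0 ∧ 20 * p ≠ 0 ∧ (20 * p) % 20 ≠ 0) := by omega
    simp only [pvBody, pvRowLoop, hdr, if_neg c2, List.take_succ_cons, List.take_zero,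
      List.drop_succ_cons, List.drop_zero, List.foldl_cons, List.foldl_nil, List.take,
      List.drop, ite_true, ite_false, reduceIte]
  | h1 :: h2e :: t =>
    have c2 : ¬ ((20 * p) % 2 = 0 ∧ 20 * p ≠ 0 ∧ (20 * p) % 20 ≠ 0) := by omega
    have c3 : ¬ ((20 * p + 1) % 20 = 0 ∧ 20 * p + 1 ≠ 0) := by omega
    have c4 : ¬ ((20 * p + 1) % 2 = 0 ∧ 20 * p + 1 ≠ 0 ∧ (20 * p + 1) % 20 ≠ 0) := by omega
    simp only [pvBody, pvRowLoop, hdr, if_neg c2, if_neg c3, if_neg c4,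
      List.take_succ_cons, List.take_zero, List.drop_succ_cons, List.drop_zero,
      List.foldl_cons, List.foldl_nil, List.take, List.drop, ite_true, ite_false, reduceIte]
    rw [show 20 * p + 1 + 1 = 20 * p + 2 by omega]
    exact pvRows t.length t p 2 _ _ (le_refl _) (by omega) (by omega) (by simp at hlen ⊢; omega)

lemma pvMain (N : Nat) : ∀ (xs : List String) (p : Nat) (html : String), xs.length ≤ N →
    pvBody xs (20 * p) ((if p = 0 then 1 else (p : Int)), html)
      = ((if (pvPageLoop xs (p : Int) html).1 = 0 then 1 else (pvPageLoop xs (p : Int) html).1),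
         (pvPageLoop xs (p : Int) html).2) := by
  induction N with
  | zero =>
    intro xs p html hN
    have : xs = [] := List.eq_nil_of_length_eq_zero (by omega)
    subst this
    simp only [pvBody, pvPageLoop, Int.natCast_eq_zero]
  | succ N ih =>
    intro xs p html hN
    match xs with
    | [] => simp only [pvBody, pvPageLoop, Int.natCast_eq_zero]
    | x :: l =>
      have hgt : ((p : Int) + 1 > 1) ↔ 0 < p := by omega
      have hne0 : ¬ ((p : Int) + 1 = 0) := by omega
      have hsplit := List.take_append_drop 20 (x :: l)
      by_cases hbig : (x :: l).length ≤ 20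
      · have htake : List.take 20 (x :: l) = x :: l := List.take_of_length_le hbig
        have hdropnil : List.drop 20 (x :: l) = [] := List.drop_eq_nil_of_le hbig
        rw [pvPage (x :: l) p html (by simp) hbig]
        simp only [pvPageLoop, htake, hdropnil, hgt, hne0, ite_false, reduceIte]
      · have htakelen : (List.take 20 (x :: l)).length = 20 := by
          rw [List.length_take]; omega
        conv_lhs => rw [← hsplit]
        rw [pvBody_append, htakelen,
          pvPage (List.take 20 (x :: l)) p html (by intro hc; rw [hc] at htakelen; simp at htakelen)
            (le_of_eq htakelen)]
        rw [show 20 * p + 20 = 20 * (p + 1) by omega]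
        have hrec := ih (List.drop 20 (x :: l)) (p + 1)
          (pvRowLoop (List.take 20 (x :: l)) true
            (if 0 < p then html ++ pvPageHdr ((p : Int) + 1) else html))
          (by simp only [List.length_drop, List.length_cons] at hN ⊢; omega)
        rw [if_neg (by omega : ¬ (p + 1 = 0))] at hrec
        push_cast at hrec
        rw [hrec]
        simp only [pvPageLoop, hgt, hne0]

-- ===== VERDICT (by name: the statement is the Claim_ definition above) =====
theorem beautify_html_spec : Claim_equal_beautify_html := by
  unfold Claim_equal_beautify_html
  intro tweets _ _
  unfold Spec_beautify_html
  cases tweets with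
  | nil =>
    simp [beautify_html, beautify_html_alt, pvLoopA, pvPageLoop,
      PySem.List.slice_to_neg_one, PySem.List.pyRange_one_eq_nil]
  | cons t ts =>
    have hb := pvBridge (t :: ts) 0 (by simp) (by simp) 1 pvHeader
    simp only [Nat.cast_zero, List.drop_zero] at hb
    have hm := pvMain ((((t :: ts).dropLast).map pvGetHtml).length)
      (((t :: ts).dropLast).map pvGetHtml) 0 pvHeader (le_refl _)
    simp only [Nat.mul_zero, Nat.cast_zero, ite_true, reduceIte] at hm
    simp only [beautify_html, beautify_html_alt, PySem.List.slice_to_neg_one,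
      List.isEmpty_cons, ite_false, Bool.false_eq_true, reduceIte]
    rw [hb, hm]
    by_cases hz : (pvPageLoop (((t :: ts).dropLast).map pvGetHtml) 0 pvHeader).1 = 0 <;>
      simp [hz]
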